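-- pv_equiv track=rewrite | github.com/kms70847/Advent-of-Code-2015 | 24/main.py | masks
-- ===== SOURCE A (Python) =====
-- def masks(size, num_trues):
--     assert size >= num_trues
--     if size == num_trues:
--         yield [True] * size
--         return
--     if num_trues == 0:
--         yield [False] * size
--         return
--
--     for x in masks(size-1, num_trues):
--         yield [False] + x
--     for x in masks(size-1, num_trues-1):
--         yield [True] + x
-- ===== SOURCE B (Python) =====
-- def masks(size, num_trues):
--     assert size >= num_trues
--
--     def tails(s, t):
--         # all length-s masks with t Trues, longer leading False-runs first
--         if t == 0:
--             yield [False] * s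
--             return
--         if t == s:
--             yield [True] * s
--             return
--         for i in range(s - t, -1, -1):
--             for x in tails(s - i - 1, t - 1):
--                 yield [False] * i + [True] + x
--
--     yield from tails(size, num_trues)
-- ===== Notes on version B (the rewrite author's own statement) =====
-- stated objective: alternative
-- what changed: Replaces A's element-at-a-time recursion on size (prepend False/True to each recursive mask) by a recursion on the number of Trues that emits the whole leading False-run before the first True in one step, looping over the run length, with all-False/all-True base cases.
import Mathlib
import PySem

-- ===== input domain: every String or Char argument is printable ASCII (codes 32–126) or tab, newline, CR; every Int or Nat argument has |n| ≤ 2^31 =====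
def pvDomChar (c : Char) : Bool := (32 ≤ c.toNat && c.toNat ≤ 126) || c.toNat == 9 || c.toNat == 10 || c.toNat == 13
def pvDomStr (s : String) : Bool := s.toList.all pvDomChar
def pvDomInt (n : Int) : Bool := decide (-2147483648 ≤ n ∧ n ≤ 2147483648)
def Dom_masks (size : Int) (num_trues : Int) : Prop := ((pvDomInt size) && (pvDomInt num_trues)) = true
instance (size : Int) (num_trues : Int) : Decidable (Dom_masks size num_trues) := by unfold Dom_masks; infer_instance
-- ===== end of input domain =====

-- B replaces A's element-at-a-time recursion on size by a recursion on the number of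
-- Trues that emits the whole leading run of Falses before the first True in one step
-- (alternative decomposition; far less recursion depth and list copying).
-- Both generators are ported as the list of yielded values.

-- ===== PORT A =====
-- A is a recursive generator; the port returns the list of yielded masks.
def masks (size : Int) (num_trues : Int) : List (List Bool) :=
  if _h1 : size < num_trues then []        -- 'assert size >= num_trues' raises AssertionError (outside Pre_masks)
  else if _h2 : size = num_trues then [List.replicate size.toNat true]
  else if _h3 : num_trues = 0 then [List.replicate size.toNat false]
  else if _h4 : num_trues < 0 then []      -- Python recurses without bound here (RecursionError; outside Pre_masks)
  else
    (masks (size - 1) num_trues).map (fun x => false :: x)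
      ++ (masks (size - 1) (num_trues - 1)).map (fun x => true :: x)
termination_by size.toNat
decreasing_by all_goals omega

-- ===== PORT B =====
-- helper 'tails(s, t)': for i in range(s - t, -1, -1): yield [False]*i + [True] + x
def masks_alt_tails (s : Int) (t : Int) : List (List Bool) :=
  if _h1 : t = 0 then [List.replicate s.toNat false]
  else if _h2 : t = s then [List.replicate s.toNat true]
  else if _h3 : t < 0 then []              -- Python recurses without bound here (RecursionError; outside Pre_masks)
  else
    (PySem.List.pyRange (s - t) (-1) (-1)).foldl
      (fun acc i =>
        acc ++ (masks_alt_tails (s - i - 1) (t - 1)).map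
          (fun x => List.replicate i.toNat false ++ true :: x))
      []
termination_by t.toNat
decreasing_by omega

def masks_alt (size : Int) (num_trues : Int) : List (List Bool) :=
  if size < num_trues then []              -- 'assert size >= num_trues' raises AssertionError (outside Pre_masks)
  else masks_alt_tails size num_trues

-- ===== PRECONDITION & SPEC =====
-- Pre_ excludes exactly the inputs where A raises: size < num_trues (the assert fails,
-- AssertionError) and negative num_trues with num_trues ≠ size (unbounded recursion,
-- RecursionError).
def Pre_masks (size : Int) (num_trues : Int) : Prop :=
  num_trues ≤ size ∧ (0 ≤ num_trues ∨ num_trues = size)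
instance (size : Int) (num_trues : Int) : Decidable (Pre_masks size num_trues) := by unfold Pre_masks; infer_instance
def pvWitness_masks : Int × Int := (4, 2)

def Spec_masks (size : Int) (num_trues : Int) (out : List (List Bool)) : Prop := out = masks_alt size num_trues
instance (size : Int) (num_trues : Int) (out : List (List Bool)) : Decidable (Spec_masks size num_trues out) := by unfold Spec_masks; infer_instance

-- ===== CLAIM (what is proved, stated in full; the proofs are below) =====
def Claim_equal_masks : Prop := ∀ (size : Int) (num_trues : Int), Dom_masks size num_trues → Pre_masks size num_trues → Spec_masks size num_trues (masks size num_trues)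

-- ===== LEMMAS AND PROOFS =====

theorem flatMap_congr_mem {A B : Type} (l : List A) (f g : A → List B)
    (h : ∀ a ∈ l, f a = g a) : l.flatMap f = l.flatMap g := by
  induction l with
  | nil => rfl
  | cons x xs ih =>
    rw [List.flatMap_cons, List.flatMap_cons, h x (by simp),
      ih (fun a ha => h a (by simp [ha]))]

theorem tails_diag (k : Nat) : masks_alt_tails (k : Int) (k : Int) = [List.replicate k true] := by
  cases k with
  | zero =>
    rw [masks_alt_tails, dif_pos (by norm_num)]
    simp
  | succ j =>
    rw [masks_alt_tails, dif_neg (by omega), dif_pos rfl]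
    norm_num

theorem tails_flat (k : Nat) (t : Int) (h0 : 0 < t) (h1 : t ≤ (k : Int)) :
    masks_alt_tails (k : Int) t
      = (PySem.List.pyRange ((k : Int) - t) (-1) (-1)).flatMap
          (fun i => (masks_alt_tails ((k : Int) - i - 1) (t - 1)).map
            (fun x => List.replicate i.toNat false ++ true :: x)) := by
  by_cases hts : t = (k : Int)
  · -- the 't == s' base case agrees with the loop's value there
    obtain ⟨j, rfl⟩ : ∃ j : Nat, k = j + 1 := ⟨k - 1, by omega⟩
    rw [hts, tails_diag]
    have e0 : ((j + 1 : Nat) : Int) - ((j + 1 : Nat) : Int) = 0 := by ring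
    rw [e0, show PySem.List.pyRange 0 (-1) (-1) = [(0 : Int)] by decide]
    rw [List.flatMap_cons, List.flatMap_nil, List.append_nil]
    have e2 : ((j + 1 : Nat) : Int) - 0 - 1 = (j : Int) := by push_cast; ring
    have e3 : ((j + 1 : Nat) : Int) - 1 = (j : Int) := by push_cast; ring
    rw [e2, e3, tails_diag]
    simp [List.replicate_succ]
  · rw [masks_alt_tails, dif_neg (by omega), dif_neg (fun h => hts h), dif_neg (by omega)]
    rw [PySem.List.foldl_append_eq_flatMap, List.nil_append]

theorem countdown_split (a : Int) (h : 0 ≤ a) :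
    PySem.List.pyRange a (-1) (-1)
      = ((PySem.List.pyRange (a - 1) (-1) (-1)).map (· + 1)) ++ [(0 : Int)] := by
  rw [PySem.List.pyRange_neg_one, PySem.List.pyRange_neg_one]
  have e1 : (a - -1).toNat = (a - 1 - -1).toNat + 1 := by omega
  rw [e1, List.range_succ, List.map_append, List.map_map]
  congr 1
  · apply List.map_congr_left
    intro k _
    simp only [Function.comp_apply]
    ring
  · simp only [List.map_cons, List.map_nil]
    congr 1
    omega

theorem masks_eq_tails (n : Nat) : ∀ t : Int, 0 ≤ t → t ≤ (n : Int) →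
    masks (n : Int) t = masks_alt_tails (n : Int) t := by
  induction n with
  | zero =>
    intro t h0 h1
    have : t = 0 := by omega
    subst this
    rw [masks, dif_neg (by omega), dif_pos (by norm_num),
      masks_alt_tails, dif_pos rfl]
    simp
  | succ m ih =>
    intro t h0 h1
    by_cases hts : t = ((m + 1 : Nat) : Int)
    · rw [masks, dif_neg (by omega), dif_pos hts.symm, hts, tails_diag]
      norm_num
    · by_cases ht0 : t = 0
      · subst ht0
        rw [masks, dif_neg (by omega), dif_neg (by omega), dif_pos rfl,
          masks_alt_tails, dif_pos rfl]
      · -- 0 < t < m + 1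
        have htm : t ≤ (m : Int) := by push_cast at h1 hts ⊢; omega
        rw [masks, dif_neg (by omega), dif_neg (fun h => hts h.symm), dif_neg ht0,
          dif_neg (by omega)]
        have em : ((m + 1 : Nat) : Int) - 1 = (m : Int) := by push_cast; ring
        rw [em, ih t h0 htm, ih (t - 1) (by omega) (by omega)]
        -- now show B's flatMap form equals the two mapped halves
        rw [tails_flat (m + 1) t (by omega) (by omega), tails_flat m t (by omega) (by omega)]
        rw [countdown_split (((m + 1 : Nat) : Int) - t) (by omega)]
        rw [List.flatMap_append, List.flatMap_cons, List.flatMap_nil, List.append_nil,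
          List.flatMap_map]
        have ea : ((m + 1 : Nat) : Int) - t - 1 = (m : Int) - t := by push_cast; ring
        rw [ea]
        congr 1
        · -- False-prefixed half
          rw [List.map_flatMap]
          apply flatMap_congr_mem
          intro i hi
          rw [PySem.List.mem_pyRange_neg_one] at hi
          have hi0 : 0 ≤ i := by omega
          have eb : ((m + 1 : Nat) : Int) - (i + 1) - 1 = (m : Int) - i - 1 := by push_cast; ring
          rw [eb, List.map_map]
          apply List.map_congr_left
          intro x _
          simp only [Function.comp_apply]
          rw [show (i + 1).toNat = i.toNat + 1 by omega, List.replicate_succ]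
          rfl
        · -- True-prefixed half (i = 0)
          have ec : ((m + 1 : Nat) : Int) - 0 - 1 = (m : Int) := by push_cast; ring
          rw [ec]
          apply List.map_congr_left
          intro x _
          norm_num

-- ===== VERDICT (by name: the statement is the Claim_ definition above) =====
theorem masks_spec : Claim_equal_masks := by
  intro size num_trues _ hpre
  obtain ⟨hle, hcase⟩ := hpre
  unfold Spec_masks
  rw [masks_alt, if_neg (by omega)]
  by_cases h0 : 0 ≤ num_trues
  · obtain ⟨n, rfl⟩ := Int.eq_ofNat_of_zero_le (le_trans h0 hle)
    exact masks_eq_tails n num_trues h0 hle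
  · -- num_trues = size < 0: one all-True mask of length size.toNat = 0 on both sides
    have heq : num_trues = size := by tauto
    rw [masks, dif_neg (by omega), dif_pos heq.symm,
      masks_alt_tails, dif_neg (by omega), dif_pos heq]
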